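-- pv_equiv track=rewrite | github.com/miliar/Code_Jam_Webscraper | solutions_python/Problem_96/1866.py | choose_n
-- ===== SOURCE A (Python) =====
-- def choose_n(n, srcList):
--     if n == 0:
--         return [[]]
--     else:
--         out = []
--         for cnt, elem in enumerate(srcList):
--             out += map(lambda x: [elem] + x,
--                        choose_n(n-1, srcList[:cnt] + srcList[(cnt+1):]))
--         return out
-- ===== SOURCE B (Python) =====
-- def choose_n(n, srcList):
--     if n < 0 or n > len(srcList):
--         return []
--     states = [([], srcList)]
--     for _ in range(n):
--         states = [(prefix + [x], rest[:i] + rest[i + 1:])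
--                   for (prefix, rest) in states
--                   for i, x in enumerate(rest)]
--     return [prefix for (prefix, rest) in states]
-- ===== Notes on version B (the rewrite author's own statement) =====
-- stated objective: alternative
-- what changed: Replaces A's depth-first recursion (recursive calls per chosen element) with an iterative breadth-first loop that runs n rounds over a list of (prefix, remaining-elements) states, producing the same permutations in the same order; it trades recursion depth n for materialising one whole level of partial permutations at a time.
import Mathlib
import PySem

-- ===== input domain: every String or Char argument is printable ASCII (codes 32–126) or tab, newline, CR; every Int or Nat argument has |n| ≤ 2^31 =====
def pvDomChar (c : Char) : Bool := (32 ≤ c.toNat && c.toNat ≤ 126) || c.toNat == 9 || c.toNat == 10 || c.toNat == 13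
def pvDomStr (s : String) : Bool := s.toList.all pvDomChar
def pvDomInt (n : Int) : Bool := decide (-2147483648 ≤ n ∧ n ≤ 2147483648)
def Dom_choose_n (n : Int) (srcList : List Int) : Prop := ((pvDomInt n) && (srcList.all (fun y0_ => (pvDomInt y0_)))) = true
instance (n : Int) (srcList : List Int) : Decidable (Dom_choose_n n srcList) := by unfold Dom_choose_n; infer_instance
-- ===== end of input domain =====

-- B replaces A's depth-first recursion by an iterative breadth-first expansion of
-- (prefix, remaining) states, n rounds of a list comprehension; same values in the same order.


-- ===== PORT A =====
-- literal transliteration of A: recursion on n, loop over enumerate(srcList),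
-- out += map(lambda x: [elem] + x, choose_n(n-1, srcList[:cnt] + srcList[cnt+1:]))
def choose_n (n : Int) (srcList : List Int) : List (List Int) :=
  if n = 0 then [[]]
  else
    (PySem.List.enumerate srcList 0).attach.foldl
      (fun out ce =>
        out ++ (choose_n (n - 1)
            (PySem.List.slice srcList none (some ce.1.1) ++
             PySem.List.slice srcList (some (ce.1.1 + 1)) none)).map
          (fun x => ce.1.2 :: x))
      []
termination_by srcList.length
decreasing_by
  rcases ce with ⟨⟨cnt, elem⟩, hmem⟩
  rw [PySem.List.mem_enumerate_iff] at hmem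
  obtain ⟨k, hk, hp⟩ := hmem
  have hc : cnt = ((k : Nat) : Int) := by
    have := congrArg Prod.fst hp; simpa using this
  simp only [hc]
  rw [show ((k : Nat) : Int) + 1 = (((k + 1 : Nat)) : Int) by push_cast; ring]
  rw [PySem.List.slice_to_natCast, PySem.List.slice_from_natCast]
  simp only [List.length_append, List.length_take, List.length_drop]
  omega

-- ===== PORT B =====
-- one round of B's comprehension: expand every (prefix, rest) state by each element of rest
def altStep (states : List (List Int × List Int)) : List (List Int × List Int) :=
  states.flatMap (fun pr =>
    (PySem.List.enumerate pr.2 0).map (fun ix =>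
      (pr.1 ++ [ix.2],
       PySem.List.slice pr.2 none (some ix.1) ++ PySem.List.slice pr.2 (some (ix.1 + 1)) none)))

def choose_n_alt (n : Int) (srcList : List Int) : List (List Int) :=
  if n < 0 ∨ n > (srcList.length : Int) then []
  else
    ((PySem.List.pyRange 0 n 1).foldl (fun states _ => altStep states)
        [([], srcList)]).map (fun pr => pr.1)

-- ===== PRECONDITION & SPEC =====
def Spec_choose_n (n : Int) (srcList : List Int) (out : List (List Int)) : Prop := out = choose_n_alt n srcList
instance (n : Int) (srcList : List Int) (out : List (List Int)) : Decidable (Spec_choose_n n srcList out) := by unfold Spec_choose_n; infer_instance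

-- ===== CLAIM (what is proved, stated in full; the proofs are below) =====
def Claim_equal_choose_n : Prop := ∀ (n : Int) (srcList : List Int), Dom_choose_n n srcList → Spec_choose_n n srcList (choose_n n srcList)

-- ===== LEMMAS AND PROOFS =====

-- the slice pair is take/drop (remove the k-th element)
theorem slices_eq_remAt (xs : List Int) (k : Nat) :
    PySem.List.slice xs none (some ((k : Nat) : Int)) ++
      PySem.List.slice xs (some (((k : Nat) : Int) + 1)) none =
    xs.take k ++ xs.drop (k + 1) := by
  have h2 : ((k : Nat) : Int) + 1 = (((k + 1 : Nat)) : Int) := by push_cast; ring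
  rw [PySem.List.slice_to_natCast, h2, PySem.List.slice_from_natCast]

-- characterisation of A's loop as a flatMap over enumerate
theorem choose_n_eq_flatMap (n : Int) (hn : n ≠ 0) (xs : List Int) :
    choose_n n xs =
      (PySem.List.enumerate xs 0).flatMap (fun ce =>
        (choose_n (n - 1)
            (PySem.List.slice xs none (some ce.1) ++
             PySem.List.slice xs (some (ce.1 + 1)) none)).map (fun x => ce.2 :: x)) := by
  rw [choose_n.eq_def]
  simp only [if_neg hn]
  have hat : ∀ (g : Int × Int → List (List Int)),
      (PySem.List.enumerate xs 0).attach.foldl (fun out ce => out ++ g ce.1) ([] : List (List Int)) =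
        (PySem.List.enumerate xs 0).foldl (fun out ce => out ++ g ce) [] := fun g =>
    List.foldl_attach (f := fun out ce => out ++ g ce)
  rw [hat (fun ce =>
        (choose_n (n - 1)
            (PySem.List.slice xs none (some ce.1) ++
             PySem.List.slice xs (some (ce.1 + 1)) none)).map (fun x => ce.2 :: x)),
      PySem.List.foldl_append_eq_flatMap]
  simp

-- A returns [] whenever n is negative or exceeds the list length (the recursion strips the list empty)
theorem choose_n_out (m : Nat) : ∀ (n : Int) (xs : List Int), xs.length ≤ m →
    (n < 0 ∨ (xs.length : Int) < n) → choose_n n xs = [] := by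
  induction m with
  | zero =>
    intro n xs hlen hn
    have hx : xs = [] := List.length_eq_zero_iff.mp (Nat.le_zero.mp hlen)
    subst hx
    rw [choose_n_eq_flatMap n (by simp at hn ⊢; omega)]
    simp [PySem.List.enumerate]
  | succ m ih =>
    intro n xs hlen hn
    rw [choose_n_eq_flatMap n (by omega)]
    rw [List.flatMap_eq_nil_iff]
    intro ce hce
    rw [PySem.List.mem_enumerate_iff] at hce
    obtain ⟨k, hk, hp⟩ := hce
    subst hp
    simp only [zero_add]
    rw [show (k : Int) = ((k : Nat) : Int) from rfl, slices_eq_remAt]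
    rw [ih (n - 1) _ (by simp only [List.length_append, List.length_take, List.length_drop]; omega)
        (by simp only [List.length_append, List.length_take, List.length_drop]; omega)]
    simp

-- folding a constant-step function is iteration (length of the list is all that matters)
theorem foldl_const_iterate {α β : Type} (f : β → β) (l : List α) (s : β) :
    l.foldl (fun acc _ => f acc) s = f^[l.length] s := by
  induction l generalizing s with
  | nil => rfl
  | cons x xs ih => simp [List.foldl_cons, ih, Function.iterate_succ_apply]

-- the breadth-first invariant: after k rounds, the prefixes are each state's prefix
-- followed by every A-permutation of its remainder
theorem altStep_iterate (k : Nat) :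
    ∀ S : List (List Int × List Int),
      (altStep^[k] S).map (fun pr => pr.1) =
        S.flatMap (fun pr => (choose_n ((k : Nat) : Int) pr.2).map (fun x => pr.1 ++ x)) := by
  induction k with
  | zero =>
    intro S
    have h0 : ∀ xs : List Int, choose_n (0 : Int) xs = [[]] := by
      intro xs; rw [choose_n.eq_def]; simp
    simp [h0, List.map_eq_flatMap]
  | succ k ih =>
    intro S
    rw [Function.iterate_succ_apply, ih]
    unfold altStep
    rw [List.flatMap_assoc]
    apply List.flatMap_congr
    intro pr _
    rw [List.flatMap_map]
    have hch : choose_n (((k + 1 : Nat)) : Int) pr.2 =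
        (PySem.List.enumerate pr.2 0).flatMap (fun ce =>
          (choose_n ((k : Nat) : Int)
              (PySem.List.slice pr.2 none (some ce.1) ++
               PySem.List.slice pr.2 (some (ce.1 + 1)) none)).map (fun x => ce.2 :: x)) := by
      have : (((k + 1 : Nat)) : Int) - 1 = ((k : Nat) : Int) := by push_cast; ring
      rw [choose_n_eq_flatMap _ (by push_cast; omega), this]
    rw [hch, List.map_flatMap]
    apply List.flatMap_congr
    intro ce _
    simp [Function.comp_def]

-- ===== VERDICT (by name: the statement is the Claim_ definition above) =====
theorem choose_n_spec : Claim_equal_choose_n := by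
  intro n srcList _
  unfold Spec_choose_n choose_n_alt
  by_cases hn : n < 0 ∨ n > (srcList.length : Int)
  · rw [if_pos hn, choose_n_out srcList.length n srcList le_rfl (by omega)]
  · rw [if_neg hn]
    rw [foldl_const_iterate]
    rw [PySem.List.length_pyRange_one]
    rw [altStep_iterate]
    have hcast : ((((n - 0).toNat : Nat)) : Int) = n := by omega
    rw [hcast]
    simp
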